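-- pv_equiv track=rewrite | github.com/feymanpaper/AppUIAutomator2Navigation | utils/OCRUtils.py | __get_first_privacy_loc
-- ===== SOURCE A (Python) =====
-- def __get_first_privacy_loc(loc_list, privacy_text:str):
--     index = -1
--     for i in range(len(loc_list) - len(privacy_text) + 1):
--         flag = True
--         for j in range(len(privacy_text)):
--             if loc_list[i+j][0] != privacy_text[j]:
--                 flag = False
--                 break
--         if flag:
--             index = i
--             break
--     return index
-- ===== SOURCE B (Python) =====
-- def __get_first_privacy_loc(loc_list, privacy_text: str):
--     # Extract the first element of every box once, then scan with a slice comparison.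
--     firsts = [loc[0] for loc in loc_list]
--     pat = list(privacy_text)
--     m = len(pat)
--     i = 0
--     while True:
--         if firsts[i:i + m] == pat:
--             return i
--         if i >= len(firsts):
--             return -1
--         i += 1
-- ===== Notes on version B (the rewrite author's own statement) =====
-- stated objective: alternative
-- what changed: B extracts the first element of every box once into a flat list and scans it with whole-window slice comparisons and early return, instead of A's nested index loop with a flag/break over the 2-D structure.
-- outside the precondition, e.g. on __get_first_privacy_loc([['a'], []], 'a'): A returns 0, B raises IndexError; on __get_first_privacy_loc([[]], ''): A returns 0, B raises IndexError
import Mathlib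
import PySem

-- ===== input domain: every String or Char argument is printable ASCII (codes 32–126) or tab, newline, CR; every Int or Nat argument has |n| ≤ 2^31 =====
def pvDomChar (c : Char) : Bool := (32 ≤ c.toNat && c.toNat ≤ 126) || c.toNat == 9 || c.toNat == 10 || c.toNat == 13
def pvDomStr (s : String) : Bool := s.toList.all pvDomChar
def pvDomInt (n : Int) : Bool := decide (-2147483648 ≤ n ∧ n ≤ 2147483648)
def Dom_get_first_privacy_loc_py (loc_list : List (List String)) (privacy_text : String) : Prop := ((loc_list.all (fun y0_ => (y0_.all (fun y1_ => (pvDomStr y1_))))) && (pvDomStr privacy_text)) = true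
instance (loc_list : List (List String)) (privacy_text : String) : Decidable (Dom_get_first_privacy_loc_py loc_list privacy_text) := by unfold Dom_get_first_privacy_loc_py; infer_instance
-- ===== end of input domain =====

-- B flattens the first OCR token of every box into one list and scans it with whole-window
-- slice comparisons (alternative decomposition, same asymptotic cost as A).

-- ===== PORT A =====
-- inner 'for j in range(len(privacy_text))' loop with flag/break: recursion over the
-- remaining pattern characters, j the running index; loc_list[i+j][0] via pyGetD (in range
-- under Pre_, where every inner list is nonempty and the scanned outer index is in range)
def pvA_flag (loc : List (List String)) (i : Int) : List Char → Int → Bool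
  | [], _ => true
  | c :: rest, j =>
    if PySem.List.pyGetD (PySem.List.pyGetD loc (i + j) []) 0 "" ≠ String.ofList [c] then false
    else pvA_flag loc i rest (j + 1)

-- outer 'for i in range(...)' with 'index = i; break': first i with flag, else -1
def pvA_loop (loc : List (List String)) (pat : List Char) : List Int → Int
  | [] => -1
  | i :: rest => if pvA_flag loc i pat 0 then i else pvA_loop loc pat rest

def get_first_privacy_loc_py (loc_list : List (List String)) (privacy_text : String) : Int :=
  pvA_loop loc_list privacy_text.toList
    (PySem.List.pyRange 0 ((loc_list.length : Int) - (privacy_text.toList.length : Int) + 1) 1)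

-- ===== PORT B =====
-- B's while loop: check the window slice, then the exit test, then i += 1
def pvB_go (firsts pat : List String) (i : Nat) : Int :=
  if PySem.List.slice firsts (some (i : Int)) (some ((i : Int) + (pat.length : Int))) = pat then (i : Int)
  else if firsts.length ≤ i then -1
  else pvB_go firsts pat (i + 1)
termination_by firsts.length - i

def get_first_privacy_loc_py_alt (loc_list : List (List String)) (privacy_text : String) : Int :=
  pvB_go (loc_list.map (fun loc => PySem.List.pyGetD loc 0 ""))
    (privacy_text.toList.map (fun c => String.ofList [c])) 0

-- ===== PRECONDITION & SPEC =====
-- Pre_ excludes loc_list containing an empty inner box: B reads every box's first element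
-- upfront and raises there, while whether A raises depends on the accident of which
-- positions its matching happens to scan before stopping.
def Pre_get_first_privacy_loc_py (loc_list : List (List String)) (privacy_text : String) : Prop :=
  ∀ l ∈ loc_list, l ≠ []
instance (loc_list : List (List String)) (privacy_text : String) : Decidable (Pre_get_first_privacy_loc_py loc_list privacy_text) := by unfold Pre_get_first_privacy_loc_py; infer_instance

def pvWitness_get_first_privacy_loc_py : List (List String) × String := ([["a"], ["b"], ["c"]], "bc")

def Spec_get_first_privacy_loc_py (loc_list : List (List String)) (privacy_text : String) (out : Int) : Prop := out = get_first_privacy_loc_py_alt loc_list privacy_text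
instance (loc_list : List (List String)) (privacy_text : String) (out : Int) : Decidable (Spec_get_first_privacy_loc_py loc_list privacy_text out) := by unfold Spec_get_first_privacy_loc_py; infer_instance

-- ===== CLAIM (what is proved, stated in full; the proofs are below) =====
def Claim_equal_get_first_privacy_loc_py : Prop := ∀ (loc_list : List (List String)) (privacy_text : String), Dom_get_first_privacy_loc_py loc_list privacy_text → Pre_get_first_privacy_loc_py loc_list privacy_text → Spec_get_first_privacy_loc_py loc_list privacy_text (get_first_privacy_loc_py loc_list privacy_text)

-- ===== LEMMAS AND PROOFS =====

theorem pv_empty_ne_single (c : Char) : ("" : String) ≠ String.ofList [c] := by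
  intro h; have := congrArg String.toList h; simp at this

-- A's inner flag loop equals a window comparison on the flattened firsts list
theorem pv_flag_iff (loc : List (List String)) (pat' : List Char) (i j : Nat) :
    pvA_flag loc (i : Int) pat' (j : Int) = true ↔
    (((loc.map (fun l => PySem.List.pyGetD l 0 "")).drop (i + j)).take pat'.length
      = pat'.map (fun c => String.ofList [c])) := by
  induction pat' generalizing j with
  | nil => simp [pvA_flag]
  | cons c rest ih =>
    rw [pvA_flag]
    have hij : (i : Int) + (j : Int) = ((i + j : Nat) : Int) := by push_cast; ring
    rw [hij, PySem.List.pyGetD_natCast]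
    by_cases hlt : i + j < loc.length
    · have hdrop : (loc.map (fun l => PySem.List.pyGetD l 0 "")).drop (i + j)
          = (loc.map (fun l => PySem.List.pyGetD l 0 ""))[i + j]'(by simpa using hlt)
            :: (loc.map (fun l => PySem.List.pyGetD l 0 "")).drop (i + j + 1) :=
        List.drop_eq_getElem_cons (by simpa using hlt)
      have hget : loc.getD (i + j) [] = loc[i + j]'hlt := List.getD_eq_getElem loc [] hlt
      have hj1 : (j : Int) + 1 = ((j + 1 : Nat) : Int) := by push_cast; ring
      rw [hdrop, hget]
      simp only [List.length_cons, List.take_succ_cons, List.map_cons, List.cons.injEq,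
        List.getElem_map]
      have hadd : i + (j + 1) = i + j + 1 := by omega
      split_ifs with h
      · simp only [false_iff]
        rintro ⟨h1, _⟩
        exact h h1
      · rw [hj1, ih (j + 1), hadd]
        constructor
        · intro h2; exact ⟨not_not.mp h, h2⟩
        · intro h2; exact h2.2
    · have hge : loc.length ≤ i + j := by omega
      have hget : loc.getD (i + j) [] = [] := List.getD_eq_default loc [] hge
      have hdrop : (loc.map (fun l => PySem.List.pyGetD l 0 "")).drop (i + j) = [] := by
        apply List.drop_eq_nil_of_le; simpa using hge
      rw [hget, hdrop]
      have : PySem.List.pyGetD ([] : List String) 0 "" = "" := rfl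
      rw [this]
      simp [pv_empty_ne_single c]

-- the two scans agree from any start index i ≤ n
theorem pv_main (loc : List (List String)) (pat : List Char) (i : Nat)
    (hi : i ≤ loc.length) :
    pvA_loop loc pat (PySem.List.pyRange (i : Int) ((loc.length : Int) - (pat.length : Int) + 1) 1)
      = pvB_go (loc.map (fun l => PySem.List.pyGetD l 0 "")) (pat.map (fun c => String.ofList [c])) i := by
  set firsts := loc.map (fun l => PySem.List.pyGetD l 0 "") with hfirsts
  set n := loc.length with hn
  set m := pat.length with hm
  have hlenf : firsts.length = n := by simp [hfirsts, hn]
  rw [pvB_go]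
  have hslice : PySem.List.slice firsts (some (i : Int))
      (some ((i : Int) + ((pat.map (fun c => String.ofList [c])).length : Int)))
      = (firsts.drop i).take m := by
    have := PySem.List.slice_natCast_add firsts i (pat.map (fun c => String.ofList [c])).length
    simpa [hm] using this
  by_cases hmatch : (firsts.drop i).take m = pat.map (fun c => String.ofList [c])
  · -- window matches: both return i
    have hlen : i + m ≤ n := by
      have h1 := congrArg List.length hmatch
      simp [hlenf] at h1
      omega
    have hib : (i : Int) < (n : Int) - (m : Int) + 1 := by omega
    rw [PySem.List.pyRange_one_cons hib, pvA_loop]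
    have hflag : pvA_flag loc (i : Int) pat 0 = true := by
      have := (pv_flag_iff loc pat i 0).mpr (by simpa using hmatch)
      simpa using this
    simp only [hflag, if_true, hslice, hmatch]
  · -- no match at i
    rw [hslice, if_neg hmatch]
    have hflag : ¬ pvA_flag loc (i : Int) pat 0 = true := by
      intro h
      exact hmatch (by simpa using (pv_flag_iff loc pat i 0).mp (by simpa using h))
    by_cases hend : i < n
    · -- step both loops to i+1
      rw [if_neg (by omega : ¬ firsts.length ≤ i)]
      have hA : pvA_loop loc pat (PySem.List.pyRange (i : Int) ((n : Int) - (m : Int) + 1) 1)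
          = pvA_loop loc pat (PySem.List.pyRange ((i : Int) + 1) ((n : Int) - (m : Int) + 1) 1) := by
        by_cases hib : (i : Int) < (n : Int) - (m : Int) + 1
        · rw [PySem.List.pyRange_one_cons hib, pvA_loop]
          simp [hflag]
        · have h1 : PySem.List.pyRange (i : Int) ((n : Int) - (m : Int) + 1) 1 = [] := by
            simp [PySem.List.pyRange]; omega
          have h2 : PySem.List.pyRange ((i : Int) + 1) ((n : Int) - (m : Int) + 1) 1 = [] := by
            simp [PySem.List.pyRange]; omega
          rw [h1, h2]
      rw [hA]
      have hcast : ((i : Int) + 1) = ((i + 1 : Nat) : Int) := by push_cast; ring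
      rw [hcast, pv_main loc pat (i + 1) (by omega)]
    · -- i = n: both are exhausted
      have hin : i = n := by omega
      have hm0 : m ≠ 0 := by
        intro h0
        apply hmatch
        have : pat = [] := List.eq_nil_of_length_eq_zero (by omega)
        simp [this, h0]
      have h1 : PySem.List.pyRange (i : Int) ((n : Int) - (m : Int) + 1) 1 = [] := by
        simp [PySem.List.pyRange]; omega
      rw [h1, if_pos (by omega : firsts.length ≤ i)]
      rfl
termination_by loc.length - i

-- ===== VERDICT (by name: the statement is the Claim_ definition above) =====
theorem get_first_privacy_loc_py_spec : Claim_equal_get_first_privacy_loc_py := by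
  intro loc_list privacy_text _hdom _hpre
  unfold Spec_get_first_privacy_loc_py
  unfold get_first_privacy_loc_py get_first_privacy_loc_py_alt
  have := pv_main loc_list privacy_text.toList 0 (Nat.zero_le _)
  simpa using this
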